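-- pv_equiv track=rewrite | github.com/merterden98/cascade | src/makegraph.py | merge_hierarchy_labels
-- ===== SOURCE A (Python) =====
-- from functools import reduce
--
-- def mips_from_length(label_list):
--     if not label_list:
--         return "UNKNOWN"
--     else:
--         if len(label_list[0]) == 2:
--             return "1"
--         elif len(label_list[0]) == 5:
--             return "2"
--         elif len(label_list[0]) == 8:
--             return "3"
--     return "UNKNOWN"
--
-- def merge_hierarchy_labels(hierarchy_labels_dict_list):
--
--     for label_dict in hierarchy_labels_dict_list:
--         for protein_name in label_dict.keys():
--             # Creates  [(MIPS_LEVEL, LABEL_LIST)] for every protein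
--             label_dict[protein_name] = [
--                 (mips_from_length(label_dict[protein_name]),
--                  label_dict[protein_name])
--             ]
--
--     def merge(accum, new_dict):
--         if not accum:
--             return new_dict
--         else:
--             for key in accum.keys():
--                 if key in new_dict:
--                     prev = accum[key]
--                     accum[key] = prev + new_dict[key]
--             return accum
--
--     a = reduce(merge, hierarchy_labels_dict_list, {})
--     return a
-- ===== SOURCE B (Python) =====
-- # B: ONE pass over all dicts builds a single global dict agg mapping key -> the full
-- # concatenated label list (wrapping each value as it is seen), while recording the key
-- # list of the first non-empty dict; the result is agg projected onto those keys.
-- # Correct because every dict before the first non-empty one is empty, so agg[k] for a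
-- # base key k is exactly base's wrapped value followed by the later dicts' contributions
-- # in order. NOTE: A mutates its argument dicts in place and returns one of them; B does
-- # not mutate the argument (the equivalence is about the return value).
--
-- def mips_from_length(label_list):
--     if not label_list:
--         return "UNKNOWN"
--     else:
--         if len(label_list[0]) == 2:
--             return "1"
--         elif len(label_list[0]) == 5:
--             return "2"
--         elif len(label_list[0]) == 8:
--             return "3"
--     return "UNKNOWN"
--
-- def merge_hierarchy_labels(hierarchy_labels_dict_list):
--     agg = {}
--     base_keys = None
--     for d in hierarchy_labels_dict_list:
--         if base_keys is None and d:
--             base_keys = list(d.keys())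
--         for k, v in d.items():
--             agg[k] = agg.get(k, []) + [(mips_from_length(v), v)]
--     if base_keys is None:
--         return {}
--     return {k: agg[k] for k in base_keys}
-- ===== Notes on version B (the rewrite author's own statement) =====
-- stated objective: alternative
-- what changed: Instead of A's two phases (in-place wrapping pass, then a reduce/merge fold that rescans the accumulator's keys against each later dict), B makes one pass over all dicts building a single global key-to-concatenated-labels dict (wrapping on the fly) while noting the first non-empty dict's key list, and finally projects the global dict onto those keys; correct because all dicts before the base are empty.
import Mathlib
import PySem

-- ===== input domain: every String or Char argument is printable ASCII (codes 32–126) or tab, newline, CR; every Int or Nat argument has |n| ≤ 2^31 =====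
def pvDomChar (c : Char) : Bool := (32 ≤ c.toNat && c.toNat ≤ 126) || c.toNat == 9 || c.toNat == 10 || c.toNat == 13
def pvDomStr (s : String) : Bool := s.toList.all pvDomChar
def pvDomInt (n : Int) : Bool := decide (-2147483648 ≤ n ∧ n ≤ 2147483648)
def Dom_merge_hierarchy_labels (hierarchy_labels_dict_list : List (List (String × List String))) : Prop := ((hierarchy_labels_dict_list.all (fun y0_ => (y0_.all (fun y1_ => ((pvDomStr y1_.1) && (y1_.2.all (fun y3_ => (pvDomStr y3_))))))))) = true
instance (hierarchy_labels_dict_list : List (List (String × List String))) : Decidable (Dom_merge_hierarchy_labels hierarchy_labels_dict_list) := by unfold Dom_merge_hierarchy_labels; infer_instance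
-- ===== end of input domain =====

-- B replaces A's two phases (wrapping pass + reduce/merge fold) by a single pass building
-- one global key->concatenated-labels dict, projected onto the first non-empty dict's keys
-- (alternative decomposition, same cost); A mutates its argument dicts in place, B does not —
-- the equivalence proved here is about the return value only.


-- ===== PORT A =====
def mips_from_length (label_list : List String) : String :=
  match label_list with
  | [] => "UNKNOWN"
  | s :: _ =>
    if PySem.Str.len s = 2 then "1"
    else if PySem.Str.len s = 5 then "2"
    else if PySem.Str.len s = 8 then "3"
    else "UNKNOWN"

-- phase 1 of A: the in-place loop `label_dict[k] = [(mips_from_length(label_dict[k]), label_dict[k])]`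
-- rewrites every value once (the value TYPE changes, so it is ported as a map over the items)
def pvWrap (d : List (String × List String)) : List (String × List (String × List String)) :=
  d.map (fun kv => (kv.1, [(mips_from_length kv.2, kv.2)]))

-- A's inner `merge(accum, new_dict)` helper, Python dict operations via PySem.Dict
def pvMergeA (accum newd : List (String × List (String × List String))) :
    List (String × List (String × List String)) :=
  if accum.isEmpty then newd
  else
    ((PySem.Dict.mk accum).keys.foldl
      (fun acc key =>
        if (PySem.Dict.mk newd).contains key then
          acc.insert key (acc.getD key [] ++ (PySem.Dict.mk newd).getD key [])
        else acc)
      (PySem.Dict.mk accum)).items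

def merge_hierarchy_labels (hierarchy_labels_dict_list : List (List (String × List String))) : List (String × List (String × List String)) :=
  (hierarchy_labels_dict_list.map pvWrap).foldl pvMergeA []

-- ===== PORT B =====
-- B's single loop body: note the first non-empty dict's keys, then fold the dict's items
-- into the global aggregation dict, wrapping each value on the fly
def pvStepB (st : PySem.Dict String (List (String × List String)) × Option (List String))
    (d : List (String × List String)) :
    PySem.Dict String (List (String × List String)) × Option (List String) :=
  let bk := if st.2.isNone && !d.isEmpty then some (d.map Prod.fst) else st.2
  let agg := d.foldl
    (fun a kv => a.insert kv.1 (a.getD kv.1 [] ++ [(mips_from_length kv.2, kv.2)])) st.1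
  (agg, bk)

-- B's final projection: the recorded base keys looked up in the aggregation dict
def pvFinishB (st : PySem.Dict String (List (String × List String)) × Option (List String)) :
    List (String × List (String × List String)) :=
  match st.2 with
  | none => []
  | some ks => ks.map (fun k => (k, st.1.getD k []))

def merge_hierarchy_labels_alt (hierarchy_labels_dict_list : List (List (String × List String))) : List (String × List (String × List String)) :=
  pvFinishB (hierarchy_labels_dict_list.foldl pvStepB (PySem.Dict.mk [], none))

-- ===== PRECONDITION & SPEC =====
-- Pre_ only restricts the ENCODING: each inner association list must have pairwise-distinct
-- keys, i.e. actually represent a Python dict; no Python call can produce anything else.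
def Pre_merge_hierarchy_labels (hierarchy_labels_dict_list : List (List (String × List String))) : Prop :=
  ∀ d ∈ hierarchy_labels_dict_list, (d.map Prod.fst).Nodup
instance (hierarchy_labels_dict_list : List (List (String × List String))) : Decidable (Pre_merge_hierarchy_labels hierarchy_labels_dict_list) := by unfold Pre_merge_hierarchy_labels; infer_instance

def pvWitness_merge_hierarchy_labels : (List (List (String × List String))) :=
  [[("p1", ["xy", "abcde"]), ("p2", [])], [("p1", ["abcdefgh"])]]

def Spec_merge_hierarchy_labels (hierarchy_labels_dict_list : List (List (String × List String))) (out : List (String × List (String × List String))) : Prop := out = merge_hierarchy_labels_alt hierarchy_labels_dict_list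
instance (hierarchy_labels_dict_list : List (List (String × List String))) (out : List (String × List (String × List String))) : Decidable (Spec_merge_hierarchy_labels hierarchy_labels_dict_list out) := by unfold Spec_merge_hierarchy_labels; infer_instance

-- ===== CLAIM (what is proved, stated in full; the proofs are below) =====
def Claim_equal_merge_hierarchy_labels : Prop := ∀ (hierarchy_labels_dict_list : List (List (String × List String))), Dom_merge_hierarchy_labels hierarchy_labels_dict_list → Pre_merge_hierarchy_labels hierarchy_labels_dict_list → Spec_merge_hierarchy_labels hierarchy_labels_dict_list (merge_hierarchy_labels hierarchy_labels_dict_list)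

-- ===== LEMMAS AND PROOFS =====

-- common characterisation E of the result: first non-empty wrapped dict + per-key flatMap
def pvFirstNonempty (ws : List (List (String × List (String × List String)))) :
    Option (List (String × List (String × List String)) × List (List (String × List (String × List String)))) :=
  match ws with
  | [] => none
  | d :: rest => if d.isEmpty then pvFirstNonempty rest else some (d, rest)

def pvE (hierarchy_labels_dict_list : List (List (String × List String))) : List (String × List (String × List String)) :=
  match pvFirstNonempty (hierarchy_labels_dict_list.map pvWrap) with
  | none => []
  | some (base, rest) =>
      base.map (fun kv =>
        (kv.1, kv.2 ++ rest.flatMap (fun other =>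
          if (PySem.Dict.mk other).contains kv.1 then (PySem.Dict.mk other).getD kv.1 [] else [])))

-- ---- A-side: A = pvE ----

-- the key-rewriting fold inside pvMergeA, over a Nodup list of present keys, maps the items
theorem pv_fold_insert_items (c : String → Bool) (g : String → List (String × List String))
    (L : List String) (e : PySem.Dict String (List (String × List String)))
    (hek : e.keys.Nodup) (hL : L.Nodup) (hsub : ∀ k ∈ L, e.contains k = true) :
    (L.foldl (fun acc key =>
        if c key then acc.insert key (acc.getD key [] ++ g key) else acc) e).items
      = e.items.map (fun kv => if kv.1 ∈ L ∧ c kv.1 = true then (kv.1, kv.2 ++ g kv.1) else kv) := by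
  induction L generalizing e with
  | nil => simp
  | cons k L ih =>
    have hkL : k ∉ L := (List.nodup_cons.mp hL).1
    have hLn : L.Nodup := (List.nodup_cons.mp hL).2
    have hck : e.contains k = true := hsub k (List.mem_cons_self ..)
    by_cases hc : c k = true
    · simp only [List.foldl_cons, hc, if_true]
      set e' := e.insert k (e.getD k [] ++ g k) with he'
      have hkeys : e'.keys = e.keys := PySem.Dict.keys_insert_of_contains _ _ hck
      have hek' : e'.keys.Nodup := hkeys ▸ hek
      have hsub' : ∀ k' ∈ L, e'.contains k' = true := by
        intro k' hk'
        rw [he', PySem.Dict.contains_insert]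
        simp [hsub k' (List.mem_cons_of_mem _ hk')]
      rw [ih e' hek' hLn hsub', he', PySem.Dict.items_insert_of_contains _ _ hck,
          List.map_map]
      apply List.map_congr_left
      intro kv hkv
      by_cases hk1 : kv.1 = k
      · have hg : e.getD k [] = kv.2 := by
          have : (k, kv.2) ∈ e.items := by rw [← hk1]; exact hkv
          exact PySem.Dict.getD_of_mem_items e this hek []
        simp [Function.comp, hk1, hg, hkL, hc]
      · simp [Function.comp, hk1, List.mem_cons]
    · simp only [List.foldl_cons, hc, Bool.false_eq_true, if_false]
      rw [ih e hek hLn (fun k' hk' => hsub k' (List.mem_cons_of_mem _ hk'))]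
      apply List.map_congr_left
      intro kv hkv
      by_cases hk1 : kv.1 = k
      · simp [hk1, hc]
      · simp [hk1, List.mem_cons]

-- pvMergeA on a non-empty accumulator with distinct keys appends lookups pointwise
theorem pv_mergeA_char (accum newd : List (String × List (String × List String)))
    (hne : accum.isEmpty = false) (hk : (accum.map Prod.fst).Nodup) :
    pvMergeA accum newd
      = accum.map (fun kv =>
          (kv.1, kv.2 ++ (if (PySem.Dict.mk newd).contains kv.1 then (PySem.Dict.mk newd).getD kv.1 [] else []))) := by
  unfold pvMergeA
  rw [hne]
  simp only [Bool.false_eq_true, if_false]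
  have hek : (PySem.Dict.mk accum).keys.Nodup := by
    simpa [PySem.Dict.keys] using hk
  have hsub : ∀ k ∈ (PySem.Dict.mk accum).keys, (PySem.Dict.mk accum).contains k = true := by
    intro k hkmem
    exact (PySem.Dict.contains_iff_mem_keys _ _).mpr hkmem
  rw [pv_fold_insert_items (fun key => (PySem.Dict.mk newd).contains key)
        (fun key => (PySem.Dict.mk newd).getD key []) _ _ hek hek hsub]
  have hitems : (PySem.Dict.mk accum).items = accum := rfl
  rw [hitems]
  apply List.map_congr_left
  intro kv hkv
  have hmem : kv.1 ∈ (PySem.Dict.mk accum).keys := by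
    simp only [PySem.Dict.keys]
    exact List.mem_map_of_mem hkv
  by_cases hc : (PySem.Dict.mk newd).contains kv.1 = true
  · rw [if_pos ⟨hmem, hc⟩, if_pos hc]
  · rw [if_neg (fun h => hc h.2), if_neg hc]
    simp

-- folding pvMergeA from a non-empty accumulator appends, per key, the flatMap of lookups
theorem pv_foldA_char (ws : List (List (String × List (String × List String))))
    (accum : List (String × List (String × List String)))
    (hne : accum.isEmpty = false) (hk : (accum.map Prod.fst).Nodup) :
    ws.foldl pvMergeA accum
      = accum.map (fun kv =>
          (kv.1, kv.2 ++ ws.flatMap (fun other =>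
            if (PySem.Dict.mk other).contains kv.1 then (PySem.Dict.mk other).getD kv.1 [] else []))) := by
  induction ws generalizing accum with
  | nil =>
    simp only [List.foldl_nil, List.flatMap_nil, List.append_nil]
    conv_lhs => rw [← List.map_id accum]
    rfl
  | cons d ws ih =>
    rw [List.foldl_cons, pv_mergeA_char accum d hne hk]
    rw [ih _ (by
          cases accum with
          | nil => simp at hne
          | cons a t => simp)
        (by simpa [List.map_map] using hk)]
    simp [List.map_map, Function.comp, List.append_assoc]

theorem pv_A_eq_E (lst : List (List (String × List String)))
    (hk : ∀ d ∈ lst, (d.map Prod.fst).Nodup) :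
    merge_hierarchy_labels lst = pvE lst := by
  unfold merge_hierarchy_labels pvE
  have hwk : ∀ w ∈ lst.map pvWrap, (w.map Prod.fst).Nodup := by
    intro w hw
    rcases List.mem_map.mp hw with ⟨d0, hd0, rfl⟩
    simpa [pvWrap, List.map_map, Function.comp] using hk d0 hd0
  generalize lst.map pvWrap = ws at hwk ⊢
  induction ws with
  | nil => rfl
  | cons d ws ih =>
    have hstep : pvMergeA [] d = d := by simp [pvMergeA]
    rw [List.foldl_cons, hstep]
    by_cases hd : d.isEmpty = true
    · have hdnil : d = [] := by simpa [List.isEmpty_iff] using hd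
      rw [hdnil]
      rw [ih (fun x hx => hwk x (List.mem_cons_of_mem _ hx))]
      simp [pvFirstNonempty]
    · have hne : d.isEmpty = false := by simpa using hd
      rw [pv_foldA_char ws d hne (hwk d (List.mem_cons_self ..))]
      simp [pvFirstNonempty, hne]

-- ---- B-side: B = pvE ----

-- the redundant guard in pvE's lookup: a missing key already yields the default []
theorem pv_if_getD (o : List (String × List (String × List String))) (k : String) :
    (if (PySem.Dict.mk o).contains k then (PySem.Dict.mk o).getD k [] else [])
      = (PySem.Dict.mk o).getD k [] := by
  by_cases hc : (PySem.Dict.mk o).contains k = true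
  · rw [if_pos hc]
  · rw [if_neg hc, PySem.Dict.getD_of_not_contains _ _ (by rwa [← Bool.not_eq_true])]

-- getD on a literal cons dict, first-match rule
theorem pv_getD_mk_cons (k : String) (v : List (String × List String))
    (rest : List (String × List (String × List String))) (x : String)
    (d0 : List (String × List String)) :
    (PySem.Dict.mk ((k, v) :: rest)).getD x d0
      = if (k == x) = true then v else (PySem.Dict.mk rest).getD x d0 := by
  rw [PySem.Dict.getD_eq_get?_getD, PySem.Dict.get?_mk_cons]
  by_cases h : (k == x) = true
  · simp [h]
  · simp [h, PySem.Dict.getD_eq_get?_getD]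

-- B's inner item loop concatenates, at each key, the wrapped lookup of the dict
theorem pv_innerB_getD (d : List (String × List String)) (hk : (d.map Prod.fst).Nodup)
    (a : PySem.Dict String (List (String × List String))) (k : String) :
    (d.foldl (fun a kv => a.insert kv.1 (a.getD kv.1 [] ++ [(mips_from_length kv.2, kv.2)])) a).getD k []
      = a.getD k [] ++ (PySem.Dict.mk (pvWrap d)).getD k [] := by
  induction d generalizing a with
  | nil => simp [pvWrap, PySem.Dict.getD, PySem.Dict.get?]
  | cons kv t ih =>
    have hkt : kv.1 ∉ t.map Prod.fst := (List.nodup_cons.mp hk).1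
    have htn : (t.map Prod.fst).Nodup := (List.nodup_cons.mp hk).2
    rw [List.foldl_cons, ih htn]
    have hw : PySem.Dict.mk (pvWrap (kv :: t))
        = PySem.Dict.mk ((kv.1, [(mips_from_length kv.2, kv.2)]) :: pvWrap t) := by
      simp [pvWrap]
    rw [hw, pv_getD_mk_cons]
    by_cases hkk : k = kv.1
    · have htc : (PySem.Dict.mk (pvWrap t)).contains k = false := by
        rw [← Bool.not_eq_true]
        intro hcon
        have hnk : k ∉ (PySem.Dict.mk (pvWrap t)).keys := by
          rw [hkk]
          simpa [PySem.Dict.keys, pvWrap, List.map_map, Function.comp] using hkt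
        exact hnk ((PySem.Dict.contains_iff_mem_keys _ _).mp hcon)
      rw [PySem.Dict.getD_of_not_contains _ _ htc, if_pos (by simp [hkk]),
          hkk, PySem.Dict.getD_insert_self]
      simp
    · rw [PySem.Dict.getD_insert_of_ne _ _ _ hkk,
          if_neg (by simp only [beq_iff_eq]; exact fun h => hkk h.symm)]

-- the aggregation component of B's fold: a flatMap of wrapped lookups, dict by dict
theorem pv_foldB_getD (lst : List (List (String × List String)))
    (hk : ∀ d ∈ lst, (d.map Prod.fst).Nodup)
    (st : PySem.Dict String (List (String × List String)) × Option (List String)) (k : String) :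
    (lst.foldl pvStepB st).1.getD k []
      = st.1.getD k [] ++ (lst.map pvWrap).flatMap (fun o => (PySem.Dict.mk o).getD k []) := by
  induction lst generalizing st with
  | nil => simp
  | cons d t ih =>
    rw [List.foldl_cons]
    rw [ih (fun x hx => hk x (List.mem_cons_of_mem _ hx))]
    have : (pvStepB st d).1.getD k [] = st.1.getD k [] ++ (PySem.Dict.mk (pvWrap d)).getD k [] := by
      simpa [pvStepB] using pv_innerB_getD d (hk d (List.mem_cons_self ..)) st.1 k
    rw [this]
    simp [List.append_assoc]

-- once the first non-empty dict's keys are recorded, the fold never changes them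
theorem pv_foldB_keys_some (lst : List (List (String × List String)))
    (st : PySem.Dict String (List (String × List String)) × Option (List String))
    (ks : List String) (h : st.2 = some ks) :
    (lst.foldl pvStepB st).2 = some ks := by
  induction lst generalizing st with
  | nil => simpa using h
  | cons d t ih =>
    rw [List.foldl_cons]
    exact ih _ (by simp [pvStepB, h])

theorem pv_finishB_some (st : PySem.Dict String (List (String × List String)) × Option (List String))
    (ks : List String) (h : st.2 = some ks) :
    pvFinishB st = ks.map (fun k => (k, st.1.getD k [])) := by
  unfold pvFinishB
  rw [h]

theorem pv_B_eq_E (lst : List (List (String × List String)))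
    (hk : ∀ d ∈ lst, (d.map Prod.fst).Nodup) :
    merge_hierarchy_labels_alt lst = pvE lst := by
  induction lst with
  | nil => rfl
  | cons d t ih =>
    by_cases hd : d.isEmpty = true
    · have hdnil : d = [] := by simpa [List.isEmpty_iff] using hd
      subst hdnil
      have hskip : merge_hierarchy_labels_alt ([] :: t) = merge_hierarchy_labels_alt t := by
        unfold merge_hierarchy_labels_alt
        rw [List.foldl_cons]
        rfl
      rw [hskip, ih (fun x hx => hk x (List.mem_cons_of_mem _ hx))]
      simp [pvE, pvFirstNonempty, pvWrap]
    · have hne : d.isEmpty = false := by simpa using hd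
      have hdn : (d.map Prod.fst).Nodup := hk d (List.mem_cons_self ..)
      have htn : ∀ x ∈ t, (x.map Prod.fst).Nodup := fun x hx => hk x (List.mem_cons_of_mem _ hx)
      have hsnd : (pvStepB (PySem.Dict.mk [], none) d).2 = some (d.map Prod.fst) := by
        simp [pvStepB, hne]
      unfold merge_hierarchy_labels_alt
      rw [List.foldl_cons,
          pv_finishB_some _ _ (pv_foldB_keys_some t _ _ hsnd)]
      have hwne : (pvWrap d).isEmpty = false := by
        cases d with
        | nil => simp at hne
        | cons a b => simp [pvWrap]
      unfold pvE
      simp only [pvFirstNonempty, List.map_cons, hwne, Bool.false_eq_true, if_false]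
      have hkeys : pvWrap d = d.map (fun kv => (kv.1, [(mips_from_length kv.2, kv.2)])) := rfl
      rw [hkeys, List.map_map, List.map_map]
      apply List.map_congr_left
      intro kv hkv
      simp only [Function.comp]
      congr 1
      rw [pv_foldB_getD t htn _ kv.1]
      have hfst : (pvStepB (PySem.Dict.mk [], none) d).1.getD kv.1 []
          = (PySem.Dict.mk (pvWrap d)).getD kv.1 [] := by
        have hbase0 := pv_innerB_getD d hdn (PySem.Dict.mk []) kv.1
        simpa [pvStepB, PySem.Dict.getD, PySem.Dict.get?] using hbase0
      rw [hfst]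
      have hmemw : (kv.1, [(mips_from_length kv.2, kv.2)]) ∈ pvWrap d := by
        rw [hkeys]; exact List.mem_map_of_mem hkv
      have hwnodup : ((pvWrap d).map Prod.fst).Nodup := by
        simpa [pvWrap, List.map_map, Function.comp] using hdn
      have hbase : (PySem.Dict.mk (pvWrap d)).getD kv.1 [] = [(mips_from_length kv.2, kv.2)] :=
        PySem.Dict.getD_of_mem_items (PySem.Dict.mk (pvWrap d)) hmemw
          (by simpa [PySem.Dict.keys] using hwnodup) []
      rw [hbase]
      congr 1
      apply List.flatMap_congr
      intro o ho
      exact (pv_if_getD o kv.1).symm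

-- ===== VERDICT (by name: the statement is the Claim_ definition above) =====
theorem merge_hierarchy_labels_spec : Claim_equal_merge_hierarchy_labels := by
  intro lst _ hpre
  unfold Spec_merge_hierarchy_labels
  rw [pv_A_eq_E lst hpre, pv_B_eq_E lst hpre]
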